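-- pv_equiv track=rewrite | github.com/chapmanbe/RadNLP | radnlp/split.py | find_terminating_sentences
-- ===== SOURCE A (Python) =====
-- def find_terminating_sentences(txt,phrases=None):
--     """
--
--     """
--     try:
--         if not phrases:
--             phrases = ()
--         indices = [i for i in [txt.lower().find(p) for p in phrases] if i != -1]
--         return min(indices)
--     except:
--         return None
-- ===== SOURCE B (Python) =====
-- def find_terminating_sentences(txt, phrases=None):
--     ps = phrases or ()
--     low = txt.lower()
--     for i in range(len(low) + 1):
--         for p in ps:
--             if low.startswith(p, i):
--                 return i
--     return None
-- ===== Notes on version B (the rewrite author's own statement) =====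
-- stated objective: alternative
-- what changed: A runs a separate full-text find for every phrase and takes the min of the hit indices; B makes a single left-to-right scan of the lowered text and returns at the first position where any phrase matches (early exit), never locating later occurrences.
import Mathlib
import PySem

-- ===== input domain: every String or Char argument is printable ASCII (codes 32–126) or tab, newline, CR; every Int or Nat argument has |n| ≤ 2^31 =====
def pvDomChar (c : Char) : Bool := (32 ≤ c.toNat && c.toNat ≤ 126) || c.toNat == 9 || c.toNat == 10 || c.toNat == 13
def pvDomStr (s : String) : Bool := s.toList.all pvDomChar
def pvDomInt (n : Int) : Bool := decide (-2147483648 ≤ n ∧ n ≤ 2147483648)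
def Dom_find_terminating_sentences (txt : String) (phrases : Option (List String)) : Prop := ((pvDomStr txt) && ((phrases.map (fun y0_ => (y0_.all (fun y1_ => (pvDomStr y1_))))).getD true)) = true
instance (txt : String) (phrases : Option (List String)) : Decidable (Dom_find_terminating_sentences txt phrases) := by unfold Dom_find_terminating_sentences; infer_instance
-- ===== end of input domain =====

-- B replaces A's per-phrase full-text find + min by a single left-to-right scan of the
-- lowered text that returns at the first position where any phrase matches (alternative
-- decomposition, same exact result).

-- ===== PORT A =====
-- A: indices = [i for i in [txt.lower().find(p) for p in phrases] if i != -1]; min(indices),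
-- except (min of empty) -> None.
def find_terminating_sentences (txt : String) (phrases : Option (List String)) : Option Int :=
  let ps := phrases.getD []
  let indices := (ps.map (fun p => PySem.Str.find (PySem.Str.lower txt) p)).filter (fun i => i != -1)
  PySem.List.min? indices (fun x => x)

-- ===== PORT B =====
-- scan positions 0..len: return first i where some phrase is a prefix of low[i:]
def ftsScan (ps : List (List Char)) : List Char → Int → Option Int
  | cs, i =>
    if ps.any (fun p => p.isPrefixOf cs) then some i
    else
      match cs with
      | [] => none
      | _ :: t => ftsScan ps t (i + 1)

def find_terminating_sentences_alt (txt : String) (phrases : Option (List String)) : Option Int :=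
  ftsScan ((phrases.getD []).map String.toList) (PySem.Str.lower txt).toList 0

-- ===== PRECONDITION & SPEC =====
def Spec_find_terminating_sentences (txt : String) (phrases : Option (List String)) (out : Option Int) : Prop := out = find_terminating_sentences_alt txt phrases
instance (txt : String) (phrases : Option (List String)) (out : Option Int) : Decidable (Spec_find_terminating_sentences txt phrases out) := by unfold Spec_find_terminating_sentences; infer_instance

-- ===== CLAIM (what is proved, stated in full; the proofs are below) =====
def Claim_equal_find_terminating_sentences : Prop := ∀ (txt : String) (phrases : Option (List String)), Dom_find_terminating_sentences txt phrases → Spec_find_terminating_sentences txt phrases (find_terminating_sentences txt phrases)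

-- ===== LEMMAS AND PROOFS =====

-- a prefix of a dropped suffix is an infix
theorem fts_prefix_drop_infix {p L : List Char} {j : Nat} (h : p <+: L.drop j) : p <:+: L :=
  h.isInfix.trans (List.drop_suffix j L).isInfix

-- if no position matches, the scan returns none
theorem ftsScan_none (ps : List (List Char)) :
    ∀ (cs : List Char) (i : Int),
      (∀ j : Nat, ¬ (∃ p ∈ ps, p <+: cs.drop j)) → ftsScan ps cs i = none := by
  intro cs
  induction cs with
  | nil =>
    intro i h
    have h0 := h 0
    simp only [List.drop_nil] at h0
    unfold ftsScan
    have : ps.any (fun p => p.isPrefixOf ([] : List Char)) = false := by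
      rw [List.any_eq_false]
      intro p hp
      simp only [List.isPrefixOf_iff_prefix]
      exact fun hpre => h0 ⟨p, hp, by simpa using hpre⟩
    simp [this]
  | cons c t ih =>
    intro i h
    unfold ftsScan
    have h0 := h 0
    simp only [List.drop_zero] at h0
    have hcond : ps.any (fun p => p.isPrefixOf (c :: t)) = false := by
      rw [List.any_eq_false]
      intro p hp
      simp only [List.isPrefixOf_iff_prefix]
      exact fun hpre => h0 ⟨p, hp, hpre⟩
    simp only [hcond, Bool.false_eq_true, if_false]
    exact ih (i + 1) (fun j => by simpa using h (j + 1))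

-- if j is the first matching position, the scan returns i + j
theorem ftsScan_some (ps : List (List Char)) :
    ∀ (j : Nat) (cs : List Char) (i : Int),
      (∃ p ∈ ps, p <+: cs.drop j) →
      (∀ j' : Nat, j' < j → ¬ (∃ p ∈ ps, p <+: cs.drop j')) →
      ftsScan ps cs i = some (i + (j : Int)) := by
  intro j
  induction j with
  | zero =>
    intro cs i hm _
    obtain ⟨p, hp, hpre⟩ := hm
    simp only [List.drop_zero] at hpre
    unfold ftsScan
    have : ps.any (fun p => p.isPrefixOf cs) = true := by
      rw [List.any_eq_true]
      exact ⟨p, hp, by simpa [List.isPrefixOf_iff_prefix] using hpre⟩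
    simp [this]
  | succ j ih =>
    intro cs i hm hmin
    have h0 := hmin 0 (Nat.succ_pos j)
    simp only [List.drop_zero] at h0
    have hcond : ps.any (fun p => p.isPrefixOf cs) = false := by
      rw [List.any_eq_false]
      intro p hp
      simp only [List.isPrefixOf_iff_prefix]
      exact fun hpre => h0 ⟨p, hp, hpre⟩
    unfold ftsScan
    simp only [hcond, Bool.false_eq_true, if_false]
    match cs with
    | [] =>
      exfalso
      obtain ⟨p, hp, hpre⟩ := hm
      simp only [List.drop_nil] at hpre
      exact h0 ⟨p, hp, by simpa using hpre⟩
    | c :: t =>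
      have hm' : ∃ p ∈ ps, p <+: t.drop j := by simpa using hm
      have hmin' : ∀ j' : Nat, j' < j → ¬ (∃ p ∈ ps, p <+: t.drop j') := by
        intro j' hj'
        have := hmin (j' + 1) (by omega)
        simpa using this
      have hrec := ih t (i + 1) hm' hmin'
      show ftsScan ps t (i + 1) = some (i + ((j : Int) + 1))
      rw [hrec]
      congr 1
      ring

-- ===== VERDICT (by name: the statement is the Claim_ definition above) =====
theorem find_terminating_sentences_spec : Claim_equal_find_terminating_sentences := by
  intro txt phrases _
  unfold Spec_find_terminating_sentences find_terminating_sentences find_terminating_sentences_alt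
  set L := (PySem.Str.lower txt).toList with hL
  set qs := phrases.getD [] with hqs
  set indices := (qs.map (fun p => PySem.Str.find (PySem.Str.lower txt) p)).filter (fun i => i != -1) with hidx
  have hfind : ∀ p : String, PySem.Str.find (PySem.Str.lower txt) p = PySem.Chars.find L p.toList := by
    intro p; simp [PySem.Str.find_eq, hL]
  rcases hmin : PySem.List.min? indices (fun x => x) with _ | m
  · -- A returns none: indices empty, no phrase occurs
    have hnil : indices = [] := (PySem.List.min?_eq_none_iff _ _).mp hmin
    have hall : ∀ p ∈ qs, ¬ (p.toList <:+: L) := by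
      intro p hp hinf
      have hne : PySem.Chars.find L p.toList ≠ -1 :=
        (PySem.Chars.find_ne_neg_one_iff _ _).mpr hinf
      have : PySem.Str.find (PySem.Str.lower txt) p ∈ indices := by
        rw [hidx, List.mem_filter]
        exact ⟨List.mem_map_of_mem hp, by simp only [bne_iff_ne, ne_eq, hfind p]; simpa using hne⟩
      rw [hnil] at this
      exact absurd this (List.not_mem_nil)
    symm
    apply ftsScan_none
    intro j ⟨p, hp, hpre⟩
    obtain ⟨s, hs, rfl⟩ := List.mem_map.mp hp
    exact hall s hs (fts_prefix_drop_infix hpre)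
  · -- A returns some m: m is the minimal find value
    have hmem : m ∈ indices := PySem.List.min?_mem hmin
    have hle : ∀ y ∈ indices, m ≤ y := PySem.List.min?_isMin hmin
    rw [hidx, List.mem_filter] at hmem
    obtain ⟨hmapmem, hmne⟩ := hmem
    obtain ⟨p₀, hp₀, hfp₀⟩ := List.mem_map.mp hmapmem
    rw [hfind p₀] at hfp₀
    have hmne' : m ≠ -1 := by simpa using hmne
    have hm0 : 0 ≤ m := by
      have hb := PySem.Chars.neg_one_le_find L p₀.toList
      rw [hfp₀] at hb
      omega
    have hfge : (0:Int) ≤ PySem.Chars.find L p₀.toList := by rw [hfp₀]; exact hm0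
    obtain ⟨hat, _⟩ := PySem.Chars.find_spec (s := L) (sub := p₀.toList) hfge
    rw [hfp₀] at hat
    symm
    have hscan := ftsScan_some (qs.map String.toList) m.toNat L 0
      ⟨p₀.toList, List.mem_map_of_mem hp₀, hat⟩
      (by
        intro j hj ⟨p, hp, hpre⟩
        obtain ⟨s, hs, rfl⟩ := List.mem_map.mp hp
        have hinf := fts_prefix_drop_infix hpre
        have hne : PySem.Chars.find L s.toList ≠ -1 :=
          (PySem.Chars.find_ne_neg_one_iff _ _).mpr hinf
        have hmem2 : PySem.Str.find (PySem.Str.lower txt) s ∈ indices := by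
          rw [hidx, List.mem_filter]
          exact ⟨List.mem_map_of_mem hs, by simp only [bne_iff_ne, ne_eq, hfind s]; simpa using hne⟩
        have hmle : m ≤ PySem.Chars.find L s.toList := by
          have := hle _ hmem2
          rwa [hfind s] at this
        have hge0 : (0:Int) ≤ PySem.Chars.find L s.toList := by
          have := PySem.Chars.neg_one_le_find L s.toList
          omega
        obtain ⟨_, hfirst'⟩ := PySem.Chars.find_spec (s := L) (sub := s.toList) hge0
        exact hfirst' j (by omega) hpre)
    rw [hscan]
    congr 1
    omega
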